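-- pv_equiv track=rewrite | github.com/krishnakumarbhat/Research_proj | genai/autoresearch/ml/project_mechanistic_interpretability.py | _synthetic_texts
-- ===== SOURCE A (Python) =====
-- def _synthetic_texts(total: int) -> list[str]:
--     base = [
--         "Tom has a red ball. He rolls the ball to Ana. Ana laughs and rolls it back.",
--         "Mia sees a small cat under the chair. She gives the cat milk and the cat purrs.",
--         "Ben builds a tall tower from blue blocks. The tower falls and he builds it again.",
--         "A bird sits on a tree near the pond. The bird flies down and drinks water.",
--         "Lila opens a box with crayons. She draws a sun, a tree, and a green hill.",
--     ]
--     return [base[index % len(base)] for index in range(total)]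
-- ===== SOURCE B (Python) =====
-- def _synthetic_texts(total: int) -> list[str]:
--     base = [
--         "Tom has a red ball. He rolls the ball to Ana. Ana laughs and rolls it back.",
--         "Mia sees a small cat under the chair. She gives the cat milk and the cat purrs.",
--         "Ben builds a tall tower from blue blocks. The tower falls and he builds it again.",
--         "A bird sits on a tree near the pond. The bird flies down and drinks water.",
--         "Lila opens a box with crayons. She draws a sun, a tree, and a green hill.",
--     ]
--     return (base * (total // len(base) + 1))[:total]
-- ===== Notes on version B (the rewrite author's own statement) =====
-- stated objective: idiomatic
-- what changed: Replaces the per-index modulo comprehension with replicate-and-truncate: the base list is repeated enough whole times and then sliced down to the requested length.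
import Mathlib
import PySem

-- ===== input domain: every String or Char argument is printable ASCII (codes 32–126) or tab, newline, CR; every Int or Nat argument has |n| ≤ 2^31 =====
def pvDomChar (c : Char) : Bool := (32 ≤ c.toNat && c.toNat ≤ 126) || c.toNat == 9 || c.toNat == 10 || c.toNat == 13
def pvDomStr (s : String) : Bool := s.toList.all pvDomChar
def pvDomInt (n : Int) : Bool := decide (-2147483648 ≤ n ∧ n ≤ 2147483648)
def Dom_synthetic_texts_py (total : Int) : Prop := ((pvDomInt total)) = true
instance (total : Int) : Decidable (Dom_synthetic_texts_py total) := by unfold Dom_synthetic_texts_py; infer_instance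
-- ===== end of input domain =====

-- B replaces A's per-index modulo comprehension by replicate-and-truncate (base * (total//len(base)+1), sliced to total); same return value, no speed claim.

-- the constant 'base' list both Python versions define verbatim
def pvBase : List String :=
  ["Tom has a red ball. He rolls the ball to Ana. Ana laughs and rolls it back.",
   "Mia sees a small cat under the chair. She gives the cat milk and the cat purrs.",
   "Ben builds a tall tower from blue blocks. The tower falls and he builds it again.",
   "A bird sits on a tree near the pond. The bird flies down and drinks water.",
   "Lila opens a box with crayons. She draws a sun, a tree, and a green hill."]

-- ===== PORT A =====
-- [base[index % len(base)] for index in range(total)]  (index % len(base) is always in range, so pyGetD's default is never used)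
def synthetic_texts_py (total : Int) : List String :=
  (PySem.List.pyRange 0 total 1).map
    (fun index => PySem.List.pyGetD pvBase (PySem.Int.mod index (pvBase.length : Int)) "")

-- ===== PORT B =====
-- (base * (total // len(base) + 1))[:total]   (Python list * k: k.toNat copies concatenated)
def synthetic_texts_py_alt (total : Int) : List String :=
  PySem.List.slice
    (List.flatten (List.replicate (PySem.Int.floordiv total (pvBase.length : Int) + 1).toNat pvBase))
    none (some total)

-- ===== PRECONDITION & SPEC =====
def Spec_synthetic_texts_py (total : Int) (out : List String) : Prop := out = synthetic_texts_py_alt total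
instance (total : Int) (out : List String) : Decidable (Spec_synthetic_texts_py total out) := by unfold Spec_synthetic_texts_py; infer_instance

-- ===== CLAIM (what is proved, stated in full; the proofs are below) =====
def Claim_equal_synthetic_texts_py : Prop := ∀ (total : Int), Dom_synthetic_texts_py total → Spec_synthetic_texts_py total (synthetic_texts_py total)

-- ===== LEMMAS AND PROOFS =====

-- element i of k concatenated copies of pvBase is pvBase[i % 5]
lemma rep_getD (m i : Nat) (h : i < 5*m) :
    (List.flatten (List.replicate m pvBase)).getD i "" = pvBase.getD (i % 5) "" := by
  induction m generalizing i with
  | zero => omega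
  | succ m ih =>
    rw [List.replicate_succ, List.flatten_cons]
    by_cases h5 : i < 5
    · rw [List.getD_append _ _ _ _ (by simp [pvBase]; omega)]
      congr 1; omega
    · rw [List.getD_append_right _ _ _ _ (by simp [pvBase]; omega)]
      have : i % 5 = (i - pvBase.length) % 5 := by simp [pvBase]; omega
      rw [this]; exact ih _ (by simp [pvBase]; omega)

lemma ab_eq (total : Int) : synthetic_texts_py total = synthetic_texts_py_alt total := by
  by_cases hp : 0 < total
  · unfold synthetic_texts_py synthetic_texts_py_alt
    have h5 : (pvBase.length : Int) = 5 := by norm_num [pvBase]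
    simp only [h5]
    rw [PySem.List.slice_to _ (le_of_lt hp), PySem.List.pyRange_one]
    have hq := (PySem.Int.floordiv_eq_iff_of_pos (a := total) (b := 5) (q := PySem.Int.floordiv total 5) (by omega)).1 rfl
    set q := PySem.Int.floordiv total 5 with hqdef
    have hq0 : 0 ≤ q := by nlinarith [hq.1, hq.2]
    have hlen : total.toNat ≤ 5 * (q + 1).toNat := by omega
    apply List.ext_getElem
    · simp [pvBase]
      omega
    · intro i h1 h2
      simp only [List.getElem_map, List.getElem_range, List.getElem_take]
      rw [← List.getD_eq_getElem _ "" , rep_getD _ _ (by simp [pvBase] at h2; omega)]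
      have : PySem.Int.mod (0 + (i:Int)) (5 : Int) = ((i % 5 : Nat) : Int) := by
        simp
      rw [this, PySem.List.pyGetD_natCast]
  · unfold synthetic_texts_py synthetic_texts_py_alt
    rw [PySem.List.pyRange_one_eq_nil (by omega)]
    rcases eq_or_lt_of_le (not_lt.1 hp) with h0 | hneg
    · simp [← h0, pvBase, PySem.List.slice_to, PySem.Int.floordiv]
    · have h1 : (PySem.Int.floordiv total (pvBase.length : Int) + 1).toNat = 0 := by
        have h5 : (pvBase.length : Int) = 5 := by norm_num [pvBase]
        rw [h5]
        have hq := (PySem.Int.floordiv_eq_iff_of_pos (a := total) (b := 5) (q := PySem.Int.floordiv total 5) (by omega)).1 rfl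
        omega
      rw [h1]
      simp [PySem.List.slice]

-- ===== VERDICT (by name: the statement is the Claim_ definition above) =====
theorem synthetic_texts_py_spec : Claim_equal_synthetic_texts_py := by
  intro total _
  unfold Spec_synthetic_texts_py
  exact ab_eq total
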